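-- pv_equiv track=rewrite | github.com/ztgluis/trade-analysis | pine-scripts/lint_pine.py | _mask
-- ===== SOURCE A (Python) =====
-- _MASK_CHAR = '\x00'   # sentinel used to replace string/comment content
--
-- def _mask(source: str) -> str:
--     """
--     Replace string-literal contents and // comment bodies with _MASK_CHAR.
--     Preserves all character positions (no insertions/deletions).
--     Newlines are always kept so line-number lookups stay correct.
--     Quote characters themselves are also replaced, so the masked source
--     no longer contains any string delimiters — safe for simple regex rules.
--     """
--     M   = _MASK_CHAR
--     buf = list(source)
--     n   = len(buf)
--     i   = 0
--     while i < n: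
--         # Line comment: // → mask to end of line (preserve the newline)
--         if buf[i] == '/' and i + 1 < n and buf[i + 1] == '/':
--             i += 2
--             while i < n and buf[i] != '\n':
--                 buf[i] = M
--                 i += 1
--         # Double-quoted string
--         elif buf[i] == '"':
--             buf[i] = M
--             i += 1
--             while i < n and buf[i] != '"' and buf[i] != '\n':
--                 if buf[i] == '\\' and i + 1 < n:
--                     buf[i] = M; i += 1
--                 buf[i] = M
--                 i += 1
--             if i < n and buf[i] == '"':
--                 buf[i] = M
--                 i += 1
--         # Single-quoted string
--         elif buf[i] == "'":
--             buf[i] = M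
--             i += 1
--             while i < n and buf[i] != "'" and buf[i] != '\n':
--                 if buf[i] == '\\' and i + 1 < n:
--                     buf[i] = M; i += 1
--                 buf[i] = M
--                 i += 1
--             if i < n and buf[i] == "'":
--                 buf[i] = M
--                 i += 1
--         else:
--             i += 1
--     return ''.join(buf)
-- ===== SOURCE B (Python) =====
-- import re
--
-- _MASK_CHAR = '\x00'   # sentinel used to replace string/comment content
--
-- # One token = a line comment, a double-quoted literal, or a single-quoted
-- # literal (closing quote optional: the literal may end at newline/EOF).
-- # A backslash escapes the next character, even a newline or a quote.
-- _TOKEN = re.compile(r'//[^\n]*'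
--                     r'|"(?:\\[\s\S]|[^"\n])*"?'
--                     r"|'(?:\\[\s\S]|[^'\n])*'?")
--
-- def _mask(source: str) -> str:
--     buf = list(source)
--     for m in _TOKEN.finditer(source):
--         a, b = m.span()
--         if source[a] == '/':
--             a += 2          # keep the '//' itself, mask only the body
--         buf[a:b] = _MASK_CHAR * (b - a)
--     return ''.join(buf)
-- ===== Notes on version B (the rewrite author's own statement) =====
-- stated objective: idiomatic
-- what changed: Replaces A's hand-rolled in-place index state machine (nested while loops mutating a char buffer) with a single compiled regex whose three alternatives match line comments and quoted literals; re.finditer yields the match spans and each span is blanked at once (skipping a comment's leading //).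
import Mathlib
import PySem

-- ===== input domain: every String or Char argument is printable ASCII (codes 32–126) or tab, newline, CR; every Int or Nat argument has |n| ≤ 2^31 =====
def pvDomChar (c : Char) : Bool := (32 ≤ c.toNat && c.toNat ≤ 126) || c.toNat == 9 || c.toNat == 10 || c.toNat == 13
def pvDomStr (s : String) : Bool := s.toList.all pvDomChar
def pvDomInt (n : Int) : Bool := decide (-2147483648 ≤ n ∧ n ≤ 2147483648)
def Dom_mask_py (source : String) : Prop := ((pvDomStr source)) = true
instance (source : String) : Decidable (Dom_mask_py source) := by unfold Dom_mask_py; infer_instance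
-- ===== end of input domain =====

-- B masks string literals and // comment bodies via a single regex scan collecting
-- match spans and blanking them, instead of A's in-place index state machine; objective: idiomatic.

-- ===== PORT A =====
-- _MASK_CHAR
def pvM : Char := '\x00'

-- A's while-loop with its two inner loops, transliterated as mutual recursion on the
-- mutable buffer `buf` and index `i` (the two identical single-/double-quote elif
-- blocks share one transliteration `maskPyStr`, parameterised by the quote char q).
mutual
-- the outer `while i < n` loop
def maskPyLoop (buf : List Char) (n i : Nat) : List Char :=
  if _h : i < n then
    if buf.getD i ' ' = '/' ∧ i + 1 < n ∧ buf.getD (i+1) ' ' = '/' then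
      maskPyComment buf n (i+2)
    else if buf.getD i ' ' = '"' then
      maskPyStr (buf.set i pvM) n '"' (i+1)
    else if buf.getD i ' ' = '\'' then
      maskPyStr (buf.set i pvM) n '\'' (i+1)
    else maskPyLoop buf n (i+1)
  else buf
  termination_by (n - i, 0)
-- inner `while i < n and buf[i] != '\n'` of the comment branch, then back to the outer loop
def maskPyComment (buf : List Char) (n i : Nat) : List Char :=
  if i < n ∧ buf.getD i ' ' ≠ '\n' then
    maskPyComment (buf.set i pvM) n (i+1)
  else maskPyLoop buf n i
  termination_by (n - i, 1)
-- inner string-body while loop + the optional-closing-quote if, then back to the outer loop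
def maskPyStr (buf : List Char) (n : Nat) (q : Char) (i : Nat) : List Char :=
  if i < n ∧ buf.getD i ' ' ≠ q ∧ buf.getD i ' ' ≠ '\n' then
    if buf.getD i ' ' = '\\' ∧ i + 1 < n then
      maskPyStr ((buf.set i pvM).set (i+1) pvM) n q (i+2)
    else maskPyStr (buf.set i pvM) n q (i+1)
  else
    if i < n ∧ buf.getD i ' ' = q then maskPyLoop (buf.set i pvM) n (i+1)
    else maskPyLoop buf n i
  termination_by (n - i, 1)
end

def mask_py (source : String) : String :=
  String.mk (maskPyLoop source.toList source.toList.length 0)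

-- ===== PORT B =====
-- B runs re.finditer with the token regex  //[^\n]*  |  "(?:\\[\s\S]|[^"\n])*"?  |  '(?:\\[\s\S]|[^'\n])*'?
-- over the source and blanks each match's span (skipping the leading `//` of a comment).
-- The regex engine is ported by hand, exactly: the three alternatives start with distinct
-- characters and each body is greedy and deterministic (no backtracking can occur), so a
-- match attempt at position i is decided by the first character, the match end is computed
-- by the functions below, and finditer resumes scanning at the match end (or i+1 on failure).

-- end of a comment body `[^\n]*` starting at i (exclusive end: first '\n' at/after i, or n)
def maskEndComment (s : List Char) (n i : Nat) : Nat :=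
  if i < n ∧ s.getD i ' ' ≠ '\n' then maskEndComment s n (i+1) else i
  termination_by n - i

-- end of `(?:\\[\s\S]|[^q\n])*q?` starting at i (exclusive)
def maskEndStr (s : List Char) (n : Nat) (q : Char) (i : Nat) : Nat :=
  if _h : i < n then
    if s.getD i ' ' = q then i + 1
    else if s.getD i ' ' = '\n' then i
    else if s.getD i ' ' = '\\' ∧ i + 1 < n then maskEndStr s n q (i+2)
    else maskEndStr s n q (i+1)
  else i
  termination_by n - i

theorem maskEndComment_ge (s : List Char) (n : Nat) : ∀ i, i ≤ maskEndComment s n i := by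
  intro i
  induction hk : n - i using Nat.strong_induction_on generalizing i with
  | _ k ih =>
    rw [maskEndComment]
    split
    · next h =>
      have := ih (n - (i+1)) (by omega) (i+1) rfl
      omega
    · exact le_rfl

theorem maskEndStr_ge (s : List Char) (n : Nat) (q : Char) : ∀ i, i ≤ maskEndStr s n q i := by
  intro i
  induction hk : n - i using Nat.strong_induction_on generalizing i with
  | _ k ih =>
    rw [maskEndStr]
    split
    · next h =>
      split
      · omega
      · split
        · omega
        · split
          · have := ih (n - (i+2)) (by omega) (i+2) rfl; omega
          · have := ih (n - (i+1)) (by omega) (i+1) rfl; omega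
    · exact le_rfl

-- the list of spans [a, e) to blank, one per regex match (comments contribute their body only)
def maskSpans (s : List Char) (n i : Nat) : List (Nat × Nat) :=
  if _h : i < n then
    if s.getD i ' ' = '/' ∧ i + 1 < n ∧ s.getD (i+1) ' ' = '/' then
      (i+2, maskEndComment s n (i+2)) :: maskSpans s n (maskEndComment s n (i+2))
    else if s.getD i ' ' = '"' then
      (i, maskEndStr s n '"' (i+1)) :: maskSpans s n (maskEndStr s n '"' (i+1))
    else if s.getD i ' ' = '\'' then
      (i, maskEndStr s n '\'' (i+1)) :: maskSpans s n (maskEndStr s n '\'' (i+1))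
    else maskSpans s n (i+1)
  else []
  termination_by n - i
  decreasing_by
  · have := maskEndComment_ge s n (i+2); omega
  · have := maskEndStr_ge s n '"' (i+1); omega
  · have := maskEndStr_ge s n '\'' (i+1); omega
  · omega

-- buf[a:e] = M*(e-a)  (slice assignment of equal length = set each position)
def maskRange (b : List Char) (a e : Nat) : List Char :=
  if a < e then maskRange (b.set a pvM) (a+1) e else b
  termination_by e - a

def mask_py_alt (source : String) : String :=
  let s := source.toList
  String.mk ((maskSpans s s.length 0).foldl (fun b p => maskRange b p.1 p.2) s)

-- ===== PRECONDITION & SPEC =====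
def Spec_mask_py (source : String) (out : String) : Prop := out = mask_py_alt source
instance (source : String) (out : String) : Decidable (Spec_mask_py source out) := by unfold Spec_mask_py; infer_instance

-- ===== CLAIM (what is proved, stated in full; the proofs are below) =====
def Claim_equal_mask_py : Prop := ∀ (source : String), Dom_mask_py source → Spec_mask_py source (mask_py source)

-- ===== LEMMAS AND PROOFS =====

-- `buf` agrees with the original source `s` on every position ≥ i
def pvAgree (s buf : List Char) (i : Nat) : Prop := ∀ j, i ≤ j → buf.getD j ' ' = s.getD j ' '

theorem getD_set_ne (l : List Char) (k j : Nat) (c d : Char) (h : k ≠ j) :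
    (l.set k c).getD j d = l.getD j d := by
  simp [List.getD_eq_getElem?_getD, List.getElem?_set_ne h]

theorem pvAgree_mono (s buf : List Char) (i i' : Nat) (h : i ≤ i') (ha : pvAgree s buf i) :
    pvAgree s buf i' := fun j hj => ha j (le_trans h hj)

theorem pvAgree_set (s buf : List Char) (i : Nat) (ha : pvAgree s buf i) :
    pvAgree s (buf.set i pvM) (i+1) := by
  intro j hj
  rw [getD_set_ne _ _ _ _ _ (by omega)]
  exact ha j (by omega)

theorem maskRange_nil (b : List Char) (a e : Nat) (h : e ≤ a) : maskRange b a e = b := by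
  rw [maskRange]; simp [Nat.not_lt.mpr h]

theorem maskRange_getD_ge (b : List Char) (a e j : Nat) (h : e ≤ j) :
    (maskRange b a e).getD j ' ' = b.getD j ' ' := by
  induction hk : e - a using Nat.strong_induction_on generalizing a b with
  | _ k ih =>
    rw [maskRange]
    split
    · next hlt =>
      rw [ih (e - (a+1)) (by omega) _ (a+1) rfl]
      exact getD_set_ne _ _ _ _ _ (by omega)
    · rfl

-- the comment inner loop of A masks exactly the span computed by B's comment matcher
theorem comment_eq (s : List Char) (n : Nat) : ∀ j buf, pvAgree s buf j →
    maskPyComment buf n j = maskPyLoop (maskRange buf j (maskEndComment s n j)) n (maskEndComment s n j) := by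
  intro j
  induction hk : n - j using Nat.strong_induction_on generalizing j with
  | _ k ih =>
    intro buf ha
    have hbj : buf.getD j ' ' = s.getD j ' ' := ha j le_rfl
    by_cases h : j < n ∧ s.getD j ' ' ≠ '\n'
    · obtain ⟨hjn, hnl⟩ := h
      have he : maskEndComment s n j = maskEndComment s n (j+1) := by
        rw [maskEndComment, if_pos ⟨hjn, hnl⟩]
      have hge := maskEndComment_ge s n (j+1)
      have hm : maskRange buf j (maskEndComment s n (j+1))
          = maskRange (buf.set j pvM) (j+1) (maskEndComment s n (j+1)) := by
        rw [maskRange, if_pos (by omega)]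
      rw [maskPyComment, if_pos ⟨hjn, by rw [hbj]; exact hnl⟩]
      rw [ih (n - (j+1)) (by omega) (j+1) rfl _ (pvAgree_set s buf j ha)]
      rw [he, hm]
    · have he : maskEndComment s n j = j := by
        rw [maskEndComment, if_neg h]
      rw [maskPyComment, if_neg (by rw [hbj]; exact h), he, maskRange_nil _ _ _ le_rfl]

-- the string inner loop of A masks exactly the span computed by B's string matcher
theorem str_eq (s : List Char) (n : Nat) (q : Char) : ∀ j buf, pvAgree s buf j →
    maskPyStr buf n q j = maskPyLoop (maskRange buf j (maskEndStr s n q j)) n (maskEndStr s n q j) := by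
  intro j
  induction hk : n - j using Nat.strong_induction_on generalizing j with
  | _ k ih =>
    intro buf ha
    have hbj : buf.getD j ' ' = s.getD j ' ' := ha j le_rfl
    by_cases hn : j < n
    · by_cases hq : s.getD j ' ' = q
      · -- closing quote: masked, loop resumes at j+1
        have he : maskEndStr s n q j = j + 1 := by
          rw [maskEndStr, dif_pos hn, if_pos hq]
        have hm : maskRange buf j (j+1) = buf.set j pvM := by
          rw [maskRange, if_pos (by omega), maskRange_nil _ _ _ le_rfl]
        rw [maskPyStr, if_neg (by rw [hbj]; tauto), if_pos ⟨hn, by rw [hbj]; exact hq⟩, he, hm]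
      · by_cases hnl : s.getD j ' ' = '\n'
        · -- newline terminates the literal unconsumed
          have he : maskEndStr s n q j = j := by
            rw [maskEndStr, dif_pos hn, if_neg hq, if_pos hnl]
          rw [maskPyStr, if_neg (by rw [hbj]; tauto), if_neg (by rw [hbj]; tauto), he,
            maskRange_nil _ _ _ le_rfl]
        · by_cases hesc : s.getD j ' ' = '\\' ∧ j + 1 < n
          · -- escape: consumes and masks two characters
            have he : maskEndStr s n q j = maskEndStr s n q (j+2) := by
              rw [maskEndStr, dif_pos hn, if_neg hq, if_neg hnl, if_pos hesc]
            have hge := maskEndStr_ge s n q (j+2)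
            have ha2 : pvAgree s ((buf.set j pvM).set (j+1) pvM) (j+2) := by
              intro j' hj'
              rw [getD_set_ne _ _ _ _ _ (by omega), getD_set_ne _ _ _ _ _ (by omega)]
              exact ha j' (by omega)
            have hm : maskRange buf j (maskEndStr s n q (j+2))
                = maskRange ((buf.set j pvM).set (j+1) pvM) (j+2) (maskEndStr s n q (j+2)) := by
              rw [maskRange, if_pos (by omega), maskRange, if_pos (by omega)]
            rw [maskPyStr, if_pos ⟨hn, by rw [hbj]; exact hq, by rw [hbj]; exact hnl⟩,
              if_pos (by rw [hbj]; exact hesc)]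
            rw [ih (n - (j+2)) (by omega) (j+2) rfl _ ha2]
            rw [he, hm]
          · -- ordinary character: masked, advance one
            have he : maskEndStr s n q j = maskEndStr s n q (j+1) := by
              rw [maskEndStr, dif_pos hn, if_neg hq, if_neg hnl, if_neg hesc]
            have hge := maskEndStr_ge s n q (j+1)
            have hm : maskRange buf j (maskEndStr s n q (j+1))
                = maskRange (buf.set j pvM) (j+1) (maskEndStr s n q (j+1)) := by
              rw [maskRange, if_pos (by omega)]
            rw [maskPyStr, if_pos ⟨hn, by rw [hbj]; exact hq, by rw [hbj]; exact hnl⟩,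
              if_neg (by rw [hbj]; exact hesc)]
            rw [ih (n - (j+1)) (by omega) (j+1) rfl _ (pvAgree_set s buf j ha)]
            rw [he, hm]
    · have he : maskEndStr s n q j = j := by rw [maskEndStr, dif_neg hn]
      rw [maskPyStr, if_neg (by tauto), if_neg (by tauto), he, maskRange_nil _ _ _ le_rfl]

-- main invariant: A's outer loop from i = blanking B's spans from i
theorem loop_eq (s : List Char) (n : Nat) : ∀ k j buf, n - j ≤ k → pvAgree s buf j →
    maskPyLoop buf n j = (maskSpans s n j).foldl (fun b p => maskRange b p.1 p.2) buf := by
  intro k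
  induction k with
  | zero =>
    intro j buf hk _
    rw [maskPyLoop, maskSpans]
    simp [Nat.not_lt.mpr (by omega : n ≤ j)]
  | succ k ih =>
    intro j buf hk ha
    have hbj : buf.getD j ' ' = s.getD j ' ' := ha j le_rfl
    by_cases hn : j < n
    · have hbj1 : buf.getD (j+1) ' ' = s.getD (j+1) ' ' := ha (j+1) (by omega)
      by_cases hc : s.getD j ' ' = '/' ∧ j + 1 < n ∧ s.getD (j+1) ' ' = '/'
      · -- comment
        set e := maskEndComment s n (j+2) with hedef
        have hge := maskEndComment_ge s n (j+2)
        have ha' : pvAgree s (maskRange buf (j+2) e) e := fun j' hj' => by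
          rw [maskRange_getD_ge _ _ _ _ hj']; exact ha j' (by omega)
        rw [maskSpans, dif_pos hn, if_pos hc]
        rw [maskPyLoop, dif_pos hn, if_pos (by rw [hbj, hbj1]; exact hc)]
        rw [comment_eq s n (j+2) buf (pvAgree_mono s buf j (j+2) (by omega) ha)]
        rw [ih e (maskRange buf (j+2) e) (by omega) ha']
        rfl
      · by_cases hd : s.getD j ' ' = '"'
        · set e := maskEndStr s n '"' (j+1) with hedef
          have hge := maskEndStr_ge s n '"' (j+1)
          have ha' : pvAgree s (maskRange buf j e) e := fun j' hj' => by
            rw [maskRange_getD_ge _ _ _ _ hj']; exact ha j' (by omega)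
          have hm : maskRange buf j e = maskRange (buf.set j pvM) (j+1) e := by
            rw [maskRange, if_pos (by omega)]
          rw [maskSpans, dif_pos hn, if_neg hc, if_pos hd]
          rw [maskPyLoop, dif_pos hn, if_neg (by rw [hbj, hbj1]; exact hc),
            if_pos (by rw [hbj]; exact hd)]
          rw [str_eq s n '"' (j+1) (buf.set j pvM) (pvAgree_set s buf j ha)]
          rw [← hedef, ← hm, ih e (maskRange buf j e) (by omega) ha']
          rfl
        · by_cases hs : s.getD j ' ' = '\''
          · set e := maskEndStr s n '\'' (j+1) with hedef
            have hge := maskEndStr_ge s n '\'' (j+1)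
            have ha' : pvAgree s (maskRange buf j e) e := fun j' hj' => by
              rw [maskRange_getD_ge _ _ _ _ hj']; exact ha j' (by omega)
            have hm : maskRange buf j e = maskRange (buf.set j pvM) (j+1) e := by
              rw [maskRange, if_pos (by omega)]
            rw [maskSpans, dif_pos hn, if_neg hc, if_neg hd, if_pos hs]
            rw [maskPyLoop, dif_pos hn, if_neg (by rw [hbj, hbj1]; exact hc),
              if_neg (by rw [hbj]; exact hd), if_pos (by rw [hbj]; exact hs)]
            rw [str_eq s n '\'' (j+1) (buf.set j pvM) (pvAgree_set s buf j ha)]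
            rw [← hedef, ← hm, ih e (maskRange buf j e) (by omega) ha']
            rfl
          · rw [maskSpans, dif_pos hn, if_neg hc, if_neg hd, if_neg hs]
            rw [maskPyLoop, dif_pos hn, if_neg (by rw [hbj, hbj1]; exact hc),
              if_neg (by rw [hbj]; exact hd), if_neg (by rw [hbj]; exact hs)]
            exact ih (j+1) buf (by omega) (pvAgree_mono s buf j (j+1) (by omega) ha)
    · rw [maskPyLoop, dif_neg hn, maskSpans, dif_neg hn]
      rfl

-- ===== VERDICT (by name: the statement is the Claim_ definition above) =====
theorem mask_py_spec : Claim_equal_mask_py := by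
  intro source _
  unfold Spec_mask_py mask_py mask_py_alt
  congr 1
  exact loop_eq source.toList source.toList.length source.toList.length 0 source.toList
    (by omega) (fun j _ => rfl)
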